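-- pv_equiv track=rewrite | github.com/MariaPdg/yandex-training | hw-2B/Python/D-benches.py | bench_legs_to_leave
-- ===== SOURCE A (Python) =====
-- def bench_legs_to_leave(length, coord):
--
--      if length % 2 and length // 2 in coord:
--           return [length // 2]
--
--      l = length // 2 - 1
--      r = l + 1
--      res = []
--      while l >= 0:
--           if l in coord:
--                res.append(l)
--                break
--           l -= 1
--      while r < length:
--           if r in coord:
--                res.append(r)
--                break
--           r += 1
--
--      return res
-- ===== SOURCE B (Python) =====
-- def bench_legs_to_leave(length, coord):
--     # One pass: max occupied coord left of the midpoint, min occupied coord right of it.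
--     mid = length // 2
--     if length % 2 and mid in coord:
--         return [mid]
--     left = max((c for c in coord if 0 <= c < mid), default=None)
--     right = min((c for c in coord if mid <= c < length), default=None)
--     res = []
--     if left is not None:
--         res.append(left)
--     if right is not None:
--         res.append(right)
--     return res
-- ===== Notes on version B (the rewrite author's own statement) =====
-- stated objective: faster
-- what changed: Replaces the two step-by-step scans outward from the midpoint (each step an O(n) list membership test) by a single filtered max/min pass over coord.
import Mathlib
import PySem

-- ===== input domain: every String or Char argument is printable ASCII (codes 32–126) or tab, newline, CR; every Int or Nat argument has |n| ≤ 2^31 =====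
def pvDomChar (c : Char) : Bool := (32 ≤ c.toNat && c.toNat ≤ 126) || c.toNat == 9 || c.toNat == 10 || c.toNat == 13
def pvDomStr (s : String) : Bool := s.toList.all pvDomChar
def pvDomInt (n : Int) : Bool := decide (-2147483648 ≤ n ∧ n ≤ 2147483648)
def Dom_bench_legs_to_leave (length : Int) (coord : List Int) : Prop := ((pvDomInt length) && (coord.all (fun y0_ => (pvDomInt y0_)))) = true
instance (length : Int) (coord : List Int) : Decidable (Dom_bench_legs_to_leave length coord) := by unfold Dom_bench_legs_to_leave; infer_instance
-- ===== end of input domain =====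

-- B replaces A's two stepwise scans outward from the midpoint (each step an O(n)
-- membership test) by one filtered max/min pass over coord: faster, asymptotically.


-- ===== PORT A =====
-- 'while l >= 0: if l in coord: append l; break; l -= 1'
def pvAleft (coord : List Int) (l : Int) : List Int :=
  if _h : 0 ≤ l then
    if coord.contains l then [l] else pvAleft coord (l - 1)
  else []
termination_by (l + 1).toNat
decreasing_by omega

-- 'while r < length: if r in coord: append r; break; r += 1'
def pvAright (length : Int) (coord : List Int) (r : Int) : List Int :=
  if _h : r < length then
    if coord.contains r then [r] else pvAright length coord (r + 1)
  else []
termination_by (length - r).toNat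
decreasing_by omega

def bench_legs_to_leave (length : Int) (coord : List Int) : List Int :=
  if PySem.Int.mod length 2 ≠ 0 ∧ coord.contains (PySem.Int.floordiv length 2) then
    [PySem.Int.floordiv length 2]
  else
    pvAleft coord (PySem.Int.floordiv length 2 - 1) ++
      pvAright length coord (PySem.Int.floordiv length 2)

-- ===== PORT B =====
def bench_legs_to_leave_alt (length : Int) (coord : List Int) : List Int :=
  if PySem.Int.mod length 2 ≠ 0 ∧ coord.contains (PySem.Int.floordiv length 2) then
    [PySem.Int.floordiv length 2]
  else
    (match PySem.List.max? (coord.filter (fun c => decide (0 ≤ c) && decide (c < PySem.Int.floordiv length 2))) (fun y => y) with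
      | some m => [m] | none => []) ++
      (match PySem.List.min? (coord.filter (fun c => decide (PySem.Int.floordiv length 2 ≤ c) && decide (c < length))) (fun y => y) with
      | some m => [m] | none => [])

-- ===== PRECONDITION & SPEC =====
def Spec_bench_legs_to_leave (length : Int) (coord : List Int) (out : List Int) : Prop := out = bench_legs_to_leave_alt length coord
instance (length : Int) (coord : List Int) (out : List Int) : Decidable (Spec_bench_legs_to_leave length coord out) := by unfold Spec_bench_legs_to_leave; infer_instance

-- ===== CLAIM (what is proved, stated in full; the proofs are below) =====
def Claim_equal_bench_legs_to_leave : Prop := ∀ (length : Int) (coord : List Int), Dom_bench_legs_to_leave length coord → Spec_bench_legs_to_leave length coord (bench_legs_to_leave length coord)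

-- ===== LEMMAS AND PROOFS =====

theorem pv_max?_eq_some {xs : List Int} {l : Int} (hmem : l ∈ xs) (hub : ∀ x ∈ xs, x ≤ l) :
    PySem.List.max? xs (fun y => y) = some l := by
  cases hm : PySem.List.max? xs (fun y => y) with
  | none => exact absurd ((PySem.List.max?_eq_none_iff _ _).mp hm ▸ hmem) (List.not_mem_nil)
  | some m =>
    have h1 : m ≤ l := hub m (PySem.List.max?_mem hm)
    have h2 : l ≤ m := PySem.List.max?_isMax hm l hmem
    exact congrArg some (le_antisymm h1 h2)

theorem pv_min?_eq_some {xs : List Int} {l : Int} (hmem : l ∈ xs) (hlb : ∀ x ∈ xs, l ≤ x) :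
    PySem.List.min? xs (fun y => y) = some l := by
  cases hm : PySem.List.min? xs (fun y => y) with
  | none => exact absurd ((PySem.List.min?_eq_none_iff _ _).mp hm ▸ hmem) (List.not_mem_nil)
  | some m =>
    have h1 : l ≤ m := hlb m (PySem.List.min?_mem hm)
    have h2 : m ≤ l := PySem.List.min?_isMin hm l hmem
    exact congrArg some (le_antisymm h2 h1)

theorem pvAleft_eq (coord : List Int) (l : Int) :
    pvAleft coord l =
      match PySem.List.max? (coord.filter (fun c => decide (0 ≤ c) && decide (c ≤ l))) (fun y => y) with
      | some m => [m] | none => [] := by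
  fun_induction pvAleft coord l with
  | case1 l h hc =>
    -- l ≥ 0 and l ∈ coord : l is the max of the filter
    have hmem : l ∈ coord.filter (fun c => decide (0 ≤ c) && decide (c ≤ l)) := by
      simp [List.mem_filter, h]
      exact List.contains_iff_mem.mp hc
    have hub : ∀ x ∈ coord.filter (fun c => decide (0 ≤ c) && decide (c ≤ l)), x ≤ l := by
      intro x hx
      simp [List.mem_filter] at hx
      exact hx.2.2
    rw [pv_max?_eq_some hmem hub]
  | case2 l h hc ih =>
    have hfe : coord.filter (fun c => decide (0 ≤ c) && decide (c ≤ l)) =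
        coord.filter (fun c => decide (0 ≤ c) && decide (c ≤ l - 1)) := by
      apply List.filter_congr
      intro x hx
      have hne : x ≠ l := by
        intro he; subst he
        exact absurd (List.contains_iff_mem.mpr hx) (by simpa using hc)
      by_cases h0 : (0 : Int) ≤ x <;> simp [h0]
      omega
    rw [hfe, ih]
  | case3 l h =>
    have hfe : coord.filter (fun c => decide (0 ≤ c) && decide (c ≤ l)) = [] := by
      apply List.filter_eq_nil_iff.mpr
      intro x _
      simp; omega
    rw [hfe, (PySem.List.max?_eq_none_iff _ _).mpr rfl]

theorem pvAright_eq (length : Int) (coord : List Int) (r : Int) :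
    pvAright length coord r =
      match PySem.List.min? (coord.filter (fun c => decide (r ≤ c) && decide (c < length))) (fun y => y) with
      | some m => [m] | none => [] := by
  fun_induction pvAright length coord r with
  | case1 r h hc =>
    have hmem : r ∈ coord.filter (fun c => decide (r ≤ c) && decide (c < length)) := by
      simp [List.mem_filter, h]
      exact List.contains_iff_mem.mp hc
    have hlb : ∀ x ∈ coord.filter (fun c => decide (r ≤ c) && decide (c < length)), r ≤ x := by
      intro x hx
      simp [List.mem_filter] at hx
      exact hx.2.1
    rw [pv_min?_eq_some hmem hlb]
  | case2 r h hc ih =>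
    have hfe : coord.filter (fun c => decide (r ≤ c) && decide (c < length)) =
        coord.filter (fun c => decide (r + 1 ≤ c) && decide (c < length)) := by
      apply List.filter_congr
      intro x hx
      have hne : x ≠ r := by
        intro he; subst he
        exact absurd (List.contains_iff_mem.mpr hx) (by simpa using hc)
      by_cases h0 : x < length <;> simp [h0]
      omega
    rw [hfe, ih]
  | case3 r h =>
    have hfe : coord.filter (fun c => decide (r ≤ c) && decide (c < length)) = [] := by
      apply List.filter_eq_nil_iff.mpr
      intro x _
      simp; omega
    rw [hfe, (PySem.List.min?_eq_none_iff _ _).mpr rfl]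

-- ===== VERDICT (by name: the statement is the Claim_ definition above) =====
theorem bench_legs_to_leave_spec : Claim_equal_bench_legs_to_leave := by
  intro length coord _
  unfold Spec_bench_legs_to_leave bench_legs_to_leave bench_legs_to_leave_alt
  by_cases h : PySem.Int.mod length 2 ≠ 0 ∧ coord.contains (PySem.Int.floordiv length 2)
  · rw [if_pos h, if_pos h]
  · rw [if_neg h, if_neg h, pvAleft_eq, pvAright_eq]
    have hfe : coord.filter (fun c => decide (0 ≤ c) && decide (c ≤ PySem.Int.floordiv length 2 - 1)) =
        coord.filter (fun c => decide (0 ≤ c) && decide (c < PySem.Int.floordiv length 2)) := by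
      apply List.filter_congr
      intro x _
      by_cases h0 : (0 : Int) ≤ x <;> simp [h0]
    rw [hfe]
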